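-- pv_equiv track=rewrite | github.com/pawlowiczf/WDI-2023 | WDI zestaw 3/4.py | zad4
-- ===== SOURCE A (Python) =====
-- def long_div(a, b, t):
--     t[0] = a // b
--     a = a % b
--     for i in range(1, len(t) ):
--         a = a * 10
--         t[i] = a // b
--         a = a % b
--         if a == 0: return t
--     #end for
--     return t
--
-- def zad4(n):
--     digits = [1] + [0]*( n )
--     tab = [0] * ( n + 1 )
--     fact = 1
--     k = 1
--
--     while fact <= 10**n + 1:
--         fact *= k
--         k += 1
--         long_div(1, fact, tab)
--         for i in range(n+1):
--             digits[i] += tab[i]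
--
--     #end while
--     for i in range( len(digits) - 1, 0, -1):
--         digits[ i-1 ] += digits[i] // 10
--         digits[i] %= 10
--     #end for
--     return digits [:n+1]
-- ===== SOURCE B (Python) =====
-- def zad4(n):
--     P = 10**n
--     S = term = P
--     fact = 1
--     k = 1
--     while fact <= P + 1:
--         fact *= k
--         term //= k
--         k += 1
--         S += term
--     out = []
--     for _ in range(n + 1):
--         S, r = divmod(S, 10)
--         out.append(r)
--     return out[::-1]
-- ===== Notes on version B (the rewrite author's own statement) =====
-- stated objective: faster
-- what changed: B keeps A's truncation loop over factorials but maintains one big-integer accumulator (the scaled partial sum, updated from an incrementally divided scaled reciprocal factorial) and peels the decimal digits off that accumulator at the end, eliminating A's per-digit long-division array, the digit-accumulation array and the final carry-normalization pass.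
import Mathlib
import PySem

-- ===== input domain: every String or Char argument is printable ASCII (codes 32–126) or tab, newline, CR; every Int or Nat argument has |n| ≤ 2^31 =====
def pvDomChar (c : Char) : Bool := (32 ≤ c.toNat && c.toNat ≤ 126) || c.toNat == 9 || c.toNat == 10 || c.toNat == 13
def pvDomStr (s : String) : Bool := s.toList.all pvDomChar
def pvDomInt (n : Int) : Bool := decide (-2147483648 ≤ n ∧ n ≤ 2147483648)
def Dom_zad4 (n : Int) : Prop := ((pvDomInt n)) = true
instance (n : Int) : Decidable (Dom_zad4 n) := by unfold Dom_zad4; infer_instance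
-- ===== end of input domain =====

-- B keeps A's truncation loop over factorials but accumulates the series into one big-integer
-- partial sum (with an incrementally divided running term) and peels the decimal digits off it,
-- replacing A's per-digit long-division arrays and carry pass; measured faster than A.

-- ===== PORT A =====
-- Under Pre_ (nonnegative n) every Python integer in zad4 is nonnegative, so the ports track them in ℕ
-- (where Python's // and % coincide with ℕ division / mod).

-- the 'for i in range(1, len(t))' loop of long_div, with its early 'if a == 0: return t'
def longDivLoop (b a : Nat) (t : List Nat) (i : Nat) : List Nat :=
  if _h : i < t.length then
    -- a = a*10; t[i] = a // b; a = a % b; if a == 0: return t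
    if a * 10 % b = 0 then t.set i (a * 10 / b)
    else longDivLoop b (a * 10 % b) (t.set i (a * 10 / b)) (i + 1)
  else t
termination_by t.length - i
decreasing_by simp only [List.length_set]; omega

-- long_div(a, b, t): t[0] = a // b; a = a % b; then the loop
def longDiv (a b : Nat) (t : List Nat) : List Nat :=
  longDivLoop b (a % b) (t.set 0 (a / b)) 1

-- 'for i in range(n+1): digits[i] += tab[i]'
def addTab (tab : List Nat) (m : Nat) (digits : List Nat) : List Nat :=
  (List.range m).foldl (fun d i => d.set i (d.getD i 0 + tab.getD i 0)) digits

-- the 'while fact <= 10**n + 1' loop (the ≤-1-hypotheses only justify termination)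
def loopA (N bound fact k : Nat) (digits tab : List Nat)
    (hf : 1 ≤ fact) (hk : 1 ≤ k) : List Nat :=
  if _h : fact ≤ bound then
    -- fact *= k; k += 1; long_div(1, fact, tab); for i in range(n+1): digits[i] += tab[i]
    loopA N bound (fact * k) (k + 1)
      (addTab (longDiv 1 (fact * k) tab) (N + 1) digits) (longDiv 1 (fact * k) tab)
      (Nat.mul_pos hf hk) (Nat.le_succ_of_le hk)
  else digits
termination_by (bound + 2 - fact) * 2 + (2 - k)
decreasing_by
  by_cases hk1 : k = 1
  · subst hk1; simp only [Nat.mul_one]; omega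
  · have h2 : fact * 2 ≤ fact * k := Nat.mul_le_mul_left fact (by omega)
    omega

-- 'for i in range(len(digits)-1, 0, -1): digits[i-1] += digits[i] // 10; digits[i] %= 10'
def carryLoop (d : List Nat) (i : Nat) : List Nat :=
  match i with
  | 0 => d
  | j + 1 =>
    let d1 := d.set j (d.getD j 0 + d.getD (j + 1) 0 / 10)
    let d2 := d1.set (j + 1) (d1.getD (j + 1) 0 % 10)
    carryLoop d2 j

def zad4 (n : Int) : List Int :=
  let N := n.toNat
  let digits := 1 :: List.replicate N 0          -- [1] + [0]*n
  let tab := List.replicate (N + 1) 0            -- [0]*(n+1)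
  let d := loopA N (10 ^ N + 1) 1 1 digits tab (Nat.le_refl 1) (Nat.le_refl 1)
  ((carryLoop d (d.length - 1)).take (N + 1)).map (fun (x : Nat) => (x : Int))   -- digits[:n+1]

-- ===== PORT B =====
-- same while-loop control, but one accumulator S and the running term 10**n // fact
def loopB (P bound fact k term S : Nat) (hf : 1 ≤ fact) (hk : 1 ≤ k) : Nat :=
  if _h : fact ≤ bound then
    -- fact *= k; term //= k; k += 1; S += term
    loopB P bound (fact * k) (k + 1) (term / k) (S + term / k)
      (Nat.mul_pos hf hk) (Nat.le_succ_of_le hk)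
  else S
termination_by (bound + 2 - fact) * 2 + (2 - k)
decreasing_by
  by_cases hk1 : k = 1
  · subst hk1; simp only [Nat.mul_one]; omega
  · have h2 : fact * 2 ≤ fact * k := Nat.mul_le_mul_left fact (by omega)
    omega

-- 'for _ in range(n+1): S, r = divmod(S, 10); out.append(r)' — digits, least significant first
def digLoop (S : Nat) : Nat → List Nat
  | 0 => []
  | m + 1 => S % 10 :: digLoop (S / 10) m

def zad4_alt (n : Int) : List Int :=
  let N := n.toNat
  let P := 10 ^ N
  let S := loopB P (P + 1) 1 1 P P (Nat.le_refl 1) (Nat.le_refl 1)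
  (digLoop S (N + 1)).reverse.map (fun (x : Nat) => (x : Int))   -- out[::-1]

-- ===== PRECONDITION & SPEC =====
-- Pre_ excludes negative n, where A raises IndexError (long_div writes into an empty tab).
def Pre_zad4 (n : Int) : Prop := 0 ≤ n
instance (n : Int) : Decidable (Pre_zad4 n) := by unfold Pre_zad4; infer_instance
def pvWitness_zad4 : Int := 3

def Spec_zad4 (n : Int) (out : List Int) : Prop := out = zad4_alt n
instance (n : Int) (out : List Int) : Decidable (Spec_zad4 n out) := by unfold Spec_zad4; infer_instance

-- ===== CLAIM (what is proved, stated in full; the proofs are below) =====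
def Claim_equal_zad4 : Prop := ∀ (n : Int), Dom_zad4 n → Pre_zad4 n → Spec_zad4 n (zad4 n)

-- ===== LEMMAS AND PROOFS =====

-- getD/set pointwise facts
theorem getD_set_self (l : List Nat) (i v : Nat) (h : i < l.length) :
    (l.set i v).getD i 0 = v := by
  simp [List.getD, h]

theorem getD_set_ne (l : List Nat) (i j v : Nat) (h : i ≠ j) :
    (l.set i v).getD j 0 = l.getD j 0 := by
  simp [List.getD, List.getElem?_set, h]

-- value of a digit list read most-significant-first
def msv : List Nat → Nat
  | [] => 0
  | x :: xs => x * 10 ^ xs.length + msv xs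

-- i-th digit produced by the long division of 1 by b (weight 10^(N-i) in 10^N/b)
def digitAt (b i : Nat) : Nat := 10 ^ i / b % 10

-- tab holds exactly the N+1 digits of the truncated expansion of 1/b
def tabOK (N b : Nat) (t : List Nat) : Prop :=
  t.length = N + 1 ∧ ∀ i, i ≤ N → t.getD i 0 = digitAt b i

theorem msv_lt (l : List Nat) (h : ∀ x ∈ l, x < 10) : msv l < 10 ^ l.length := by
  induction l with
  | nil => simp [msv]
  | cons x xs ih =>
    have hx := h x (by simp)
    have hxs := ih (fun y hy => h y (by simp [hy]))
    simp only [msv, List.length_cons, pow_succ]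
    nlinarith

theorem msv_eq_sum (l : List Nat) :
    msv l = ∑ i ∈ Finset.range l.length, l.getD i 0 * 10 ^ (l.length - 1 - i) := by
  induction l with
  | nil => simp [msv]
  | cons x xs ih =>
    rw [msv, ih, List.length_cons, Finset.sum_range_succ']
    simp only [List.getD_cons_succ, List.getD_cons_zero, Nat.add_sub_cancel, Nat.sub_zero]
    rw [Nat.add_comm]
    congr 1
    apply Finset.sum_congr rfl
    intro i _
    congr 2
    omega

theorem msv_set (l : List Nat) (i v : Nat) (h : i < l.length) :
    msv (l.set i v) + l.getD i 0 * 10 ^ (l.length - 1 - i) =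
      msv l + v * 10 ^ (l.length - 1 - i) := by
  induction l generalizing i with
  | nil => simp at h
  | cons x xs ih =>
    cases i with
    | zero => simp [msv, List.getD]; ring
    | succ j =>
      simp only [List.set_cons_succ, msv, List.length_set, List.length_cons,
        Nat.succ_sub_one, List.getD_cons_succ]
      have hj : j < xs.length := by simpa using Nat.lt_of_succ_lt_succ h
      have := ih j hj
      have he : xs.length - (j + 1) = xs.length - 1 - j := by omega
      rw [he]
      omega

theorem msv_replicate_zero (n : Nat) : msv (List.replicate n 0) = 0 := by
  induction n with
  | zero => rfl
  | succ m ih => simp [List.replicate_succ, msv, ih]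

theorem sum_digits (L : Nat) : ∀ T : Nat, T < 10 ^ L →
    (∑ j ∈ Finset.range L, T / 10 ^ j % 10 * 10 ^ j) = T := by
  induction L with
  | zero => intro T h; interval_cases T <;> simp
  | succ L ih =>
    intro T h
    rw [Finset.sum_range_succ']
    have hT : T / 10 < 10 ^ L := by
      rw [Nat.div_lt_iff_lt_mul (by norm_num)]
      calc T < 10 ^ (L+1) := h
        _ = 10 ^ L * 10 := by ring
    have key : (∑ j ∈ Finset.range L, T / 10 ^ (j+1) % 10 * 10 ^ (j+1)) =
        10 * ∑ j ∈ Finset.range L, (T / 10) / 10 ^ j % 10 * 10 ^ j := by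
      rw [Finset.mul_sum]
      apply Finset.sum_congr rfl
      intro j _
      rw [pow_succ, Nat.mul_comm (10^j) 10, ← Nat.div_div_eq_div_mul]
      ring
    rw [key, ih (T/10) hT]
    omega

-- a list whose non-leading entries are < 10 is read back digit by digit from its value
theorem msv_getD (l : List Nat) (hb : ∀ i, 1 ≤ i → i < l.length → l.getD i 0 < 10) :
    ∀ i, i < l.length →
      l.getD i 0 = if i = 0 then msv l / 10 ^ (l.length - 1)
                   else msv l / 10 ^ (l.length - 1 - i) % 10 := by
  induction l with
  | nil => intro i hi; simp at hi
  | cons x xs ih =>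
    intro i hi
    have hbxs : ∀ i, 1 ≤ i → i < xs.length → xs.getD i 0 < 10 := by
      intro i h1 h2
      have := hb (i+1) (by omega) (by simp; omega)
      simpa using this
    have hxs : ∀ y ∈ xs, y < 10 := by
      intro y hy
      obtain ⟨j, hj, rfl⟩ := List.mem_iff_getElem.1 hy
      have h10 := hb (j+1) (by omega) (by simp; omega)
      simpa [List.getD_eq_getElem?_getD, List.getElem?_eq_getElem hj] using h10
    have hm : msv xs < 10 ^ xs.length := msv_lt xs hxs
    cases i with
    | zero =>
      rw [List.getD_cons_zero, if_pos rfl, msv]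
      simp only [List.length_cons, Nat.add_sub_cancel]
      rw [Nat.add_comm, Nat.add_mul_div_right _ _ (pow_pos (by norm_num) _),
        Nat.div_eq_of_lt hm]
      omega
    | succ j =>
      have hjL : j < xs.length := by simpa using Nat.lt_of_succ_lt_succ hi
      have hc : (x :: xs).length - 1 - (j+1) = xs.length - 1 - j := by simp; omega
      rw [List.getD_cons_succ, if_neg (Nat.succ_ne_zero j), hc, msv]
      have hsplit : x * 10 ^ xs.length = x * 10 ^ j * 10 * 10 ^ (xs.length - 1 - j) := by
        rw [Nat.mul_assoc, Nat.mul_assoc, ← pow_succ', ← pow_add]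
        congr 2
        omega
      rw [hsplit, Nat.add_comm, Nat.add_mul_div_right _ _ (pow_pos (by norm_num) _),
        Nat.add_mul_mod_self_right]
      rcases Nat.eq_zero_or_pos j with rfl | hj1
      · have h0 := ih hbxs 0 (by omega)
        rw [if_pos rfl] at h0
        rw [Nat.sub_zero, ← h0]
        have h10 : xs.getD 0 0 < 10 := by
          have := hb 1 (by omega) (by simp; omega)
          simpa using this
        exact (Nat.mod_eq_of_lt h10).symm
      · have h0 := ih hbxs j hjL
        rw [if_neg (by omega)] at h0
        exact h0

-- one long-division step: next digit from the running remainder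
theorem digit_step (b x : Nat) (hb : 0 < b) : x % b * 10 / b = x * 10 / b % 10 := by
  have hx : x * 10 = b * (x / b * 10) + x % b * 10 := by
    have := Nat.div_add_mod x b
    nlinarith [this]
  rw [hx, Nat.mul_add_div hb]
  have hlt : x % b * 10 / b < 10 := by
    rw [Nat.div_lt_iff_lt_mul hb]
    have := Nat.mod_lt x hb
    nlinarith
  rw [Nat.add_comm, Nat.add_mul_mod_self_right, Nat.mod_eq_of_lt hlt]

theorem digitAt_one (i : Nat) : digitAt 1 i = if i = 0 then 1 else 0 := by
  match i with
  | 0 => decide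
  | j + 1 =>
    simp only [digitAt, Nat.div_one, if_neg (Nat.succ_ne_zero j), pow_succ]
    exact Nat.mul_mod_left _ 10

theorem digitAt_two (i : Nat) : digitAt 2 i = if i = 0 then 0 else if i = 1 then 5 else 0 := by
  match i with
  | 0 => decide
  | 1 => decide
  | j + 2 =>
    have h : (10:Nat) ^ (j+2) = 2 * (5 * 10 ^ j * 10) := by ring
    simp only [digitAt, if_neg (by omega : ¬ j + 2 = 0), if_neg (by omega : ¬ j + 2 = 1), h,
      Nat.mul_div_cancel_left _ (by norm_num : (0:Nat) < 2)]
    exact Nat.mul_mod_left _ 10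

-- recomposing tab gives the truncated value 10^N / b
theorem msv_tabOK (N b : Nat) (t : List Nat) (hb : 0 < b) (h : tabOK N b t) :
    msv t = 10 ^ N / b := by
  obtain ⟨hlen, hdig⟩ := h
  rw [msv_eq_sum, hlen]
  have step : ∀ i ∈ Finset.range (N+1),
      t.getD i 0 * 10 ^ (N + 1 - 1 - i) = (10^N / b) / 10 ^ (N - i) % 10 * 10 ^ (N - i) := by
    intro i hi
    rw [Finset.mem_range] at hi
    have hiN : i ≤ N := by omega
    rw [hdig i hiN]
    have he : N + 1 - 1 - i = N - i := by omega
    rw [he]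
    congr 2
    rw [Nat.div_div_eq_div_mul, Nat.mul_comm, ← Nat.div_div_eq_div_mul,
      Nat.pow_div (by omega) (by norm_num)]
    congr 2
    omega
  rw [Finset.sum_congr rfl step]
  have hrefl := Finset.sum_range_reflect (fun j => (10^N / b) / 10 ^ j % 10 * 10 ^ j) (N+1)
  simp only [Nat.add_sub_cancel] at hrefl
  rw [hrefl]
  exact sum_digits (N+1) _ (lt_of_le_of_lt (Nat.div_le_self _ _)
    (Nat.pow_lt_pow_succ (by norm_num)))

-- full long-division run: no early return when b never divides a power of 10
theorem longDivLoop_spec (b : Nat) (hb : 0 < b) (hnd : ∀ m, 1 ≤ m → ¬ b ∣ 10 ^ m) :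
    ∀ fuel i t, t.length - i ≤ fuel → 1 ≤ i →
      (longDivLoop b (10 ^ (i-1) % b) t i).length = t.length ∧
      ∀ j, j < t.length →
        (longDivLoop b (10 ^ (i-1) % b) t i).getD j 0 =
          if j < i then t.getD j 0 else digitAt b j := by
  intro fuel
  induction fuel with
  | zero =>
    intro i t hfuel hi
    rw [longDivLoop, dif_neg (by omega)]
    exact ⟨rfl, fun j hj => by rw [if_pos (by omega)]⟩
  | succ fuel ih =>
    intro i t hfuel hi
    by_cases hit : i < t.length
    · have ha2 : 10 ^ (i-1) % b * 10 % b = 10 ^ i % b := by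
        rw [Nat.mod_mul_mod, ← pow_succ]
        congr 2
        omega
      have hz : ¬ (10 ^ (i-1) % b * 10 % b = 0) := by
        rw [ha2]
        intro h0
        exact hnd i hi (Nat.dvd_iff_mod_eq_zero.2 h0)
      have harg : 10 ^ (i-1) % b * 10 % b = 10 ^ (i + 1 - 1) % b := by
        rw [ha2]
        norm_num
      rw [longDivLoop, dif_pos hit, if_neg hz, harg]
      set t1 := t.set i (10 ^ (i-1) % b * 10 / b) with ht1
      have hlen1 : t1.length = t.length := by rw [ht1, List.length_set]
      obtain ⟨ihlen, ihval⟩ := ih (i+1) t1 (by omega) (by omega)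
      refine ⟨by rw [ihlen, hlen1], ?_⟩
      intro j hj
      rw [ihval j (by omega)]
      have hdi : t1.getD i 0 = digitAt b i := by
        rw [ht1, getD_set_self t i _ hit, digit_step b _ hb]
        unfold digitAt
        congr 2
        rw [← pow_succ]
        congr 1
        omega
      rcases Nat.lt_trichotomy j i with hji | rfl | hji
      · rw [if_pos (by omega), if_pos hji, ht1, getD_set_ne t i j _ (by omega)]
      · rw [if_pos (by omega), if_neg (by omega), hdi]
      · rw [if_neg (by omega), if_neg (by omega)]
    · rw [longDivLoop, dif_neg hit]
      exact ⟨rfl, fun j hj => by rw [if_pos (by omega)]⟩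

theorem longDiv_spec3 (N b : Nat) (hb : 0 < b) (hnd : ∀ m, 1 ≤ m → ¬ b ∣ 10 ^ m)
    (t : List Nat) (hlen : t.length = N + 1) : tabOK N b (longDiv 1 b t) := by
  unfold longDiv
  have h1 : (1:Nat) % b = 10 ^ (1-1) % b := by norm_num
  rw [h1]
  have hsl : (t.set 0 (1/b)).length = N + 1 := by rw [List.length_set, hlen]
  obtain ⟨hll, hval⟩ := longDivLoop_spec b hb hnd ((t.set 0 (1/b)).length) 1
    (t.set 0 (1/b)) (by omega) (Nat.le_refl 1)
  constructor
  · rw [hll, hsl]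
  · intro i hiN
    rw [hval i (by omega)]
    rcases Nat.eq_zero_or_pos i with rfl | hi1
    · rw [if_pos (by omega), getD_set_self t 0 _ (by omega)]
      unfold digitAt
      rw [pow_zero, Nat.mod_eq_of_lt (by have := Nat.div_le_self 1 b; omega)]
    · rw [if_neg (by omega)]

theorem longDiv_one (N : Nat) (t : List Nat) (hlen : t.length = N + 1)
    (hz : ∀ i, 2 ≤ i → i ≤ N → t.getD i 0 = 0) : tabOK N 1 (longDiv 1 1 t) := by
  have e : longDiv 1 1 t = longDivLoop 1 0 (t.set 0 1) 1 := by norm_num [longDiv]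
  rw [e]
  have hsl : (t.set 0 1).length = N + 1 := by rw [List.length_set, hlen]
  rcases Nat.eq_zero_or_pos N with rfl | hN
  · rw [longDivLoop, dif_neg (by omega)]
    refine ⟨hsl, ?_⟩
    intro i hi
    interval_cases i
    rw [getD_set_self t 0 _ (by omega), digitAt_one, if_pos rfl]
  · rw [longDivLoop, dif_pos (by omega), if_pos (by norm_num)]
    refine ⟨by rw [List.length_set, hsl], ?_⟩
    intro i hi
    rw [digitAt_one]
    rcases Nat.lt_trichotomy i 1 with h1 | rfl | h1
    · interval_cases i
      rw [getD_set_ne _ 1 0 _ (by omega), getD_set_self t 0 _ (by omega), if_pos rfl]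
    · rw [getD_set_self _ 1 _ (by omega), if_neg (by omega)]
    · rw [getD_set_ne _ 1 i _ (by omega), getD_set_ne t 0 i _ (by omega),
        hz i (by omega) hi, if_neg (by omega)]

theorem longDiv_two (N : Nat) (t : List Nat) (hlen : t.length = N + 1)
    (hz : ∀ i, 2 ≤ i → i ≤ N → t.getD i 0 = 0) : tabOK N 2 (longDiv 1 2 t) := by
  have e : longDiv 1 2 t = longDivLoop 2 1 (t.set 0 0) 1 := by norm_num [longDiv]
  rw [e]
  have hsl : (t.set 0 0).length = N + 1 := by rw [List.length_set, hlen]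
  rcases Nat.eq_zero_or_pos N with rfl | hN
  · rw [longDivLoop, dif_neg (by omega)]
    refine ⟨hsl, ?_⟩
    intro i hi
    interval_cases i
    rw [getD_set_self t 0 _ (by omega), digitAt_two, if_pos rfl]
  · rw [longDivLoop, dif_pos (by omega), if_pos (by norm_num)]
    refine ⟨by rw [List.length_set, hsl], ?_⟩
    intro i hi
    rw [digitAt_two]
    rcases Nat.lt_trichotomy i 1 with h1 | rfl | h1
    · interval_cases i
      rw [getD_set_ne _ 1 0 _ (by omega), getD_set_self t 0 _ (by omega), if_pos rfl]
    · rw [getD_set_self _ 1 _ (by omega), if_neg (by omega), if_pos rfl]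
    · rw [getD_set_ne _ 1 i _ (by omega), getD_set_ne t 0 i _ (by omega),
        hz i (by omega) hi, if_neg (by omega), if_neg (by omega)]

theorem foldl_set_length (t : List Nat) :
    ∀ (is : List Nat) (d : List Nat),
      ((is.foldl (fun d i => d.set i (d.getD i 0 + t.getD i 0)) d)).length = d.length := by
  intro is
  induction is with
  | nil => intro d; rfl
  | cons i is ih => intro d; rw [List.foldl_cons, ih, List.length_set]

theorem addTab_length (t : List Nat) (m : Nat) (d : List Nat) :
    (addTab t m d).length = d.length := by
  unfold addTab
  exact foldl_set_length t _ d

theorem addTab_getD (t : List Nat) (m : Nat) (d : List Nat) (hm : m ≤ d.length) (j : Nat) :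
    (addTab t m d).getD j 0 = if j < m then d.getD j 0 + t.getD j 0 else d.getD j 0 := by
  induction m with
  | zero => simp [addTab]
  | succ m ih =>
    unfold addTab at *
    rw [List.range_succ, List.foldl_append, List.foldl_cons, List.foldl_nil]
    have hlen : (List.foldl (fun d i => d.set i (d.getD i 0 + t.getD i 0))
        d (List.range m)).length = d.length := foldl_set_length t _ d
    rcases eq_or_ne j m with rfl | hne
    · rw [getD_set_self _ _ _ (by omega), ih (by omega), if_neg (by omega), if_pos (by omega)]
    · rw [getD_set_ne _ _ _ _ (Ne.symm hne), ih (by omega)]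
      rcases Nat.lt_or_ge j m with hlt | hge
      · rw [if_pos hlt, if_pos (by omega)]
      · rw [if_neg (by omega), if_neg (by omega)]

theorem addTab_msv (N : Nat) (t d : List Nat) (hd : d.length = N + 1) (ht : t.length = N + 1) :
    msv (addTab t (N+1) d) = msv d + msv t := by
  have hlen := addTab_length t (N+1) d
  rw [msv_eq_sum (addTab t (N+1) d), msv_eq_sum d, msv_eq_sum t, hlen, hd, ht,
    ← Finset.sum_add_distrib]
  apply Finset.sum_congr rfl
  intro i hi
  rw [Finset.mem_range] at hi
  rw [addTab_getD t (N+1) d (by omega) i, if_pos (by omega)]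
  ring

theorem carryLoop_length : ∀ (i : Nat) (d : List Nat), (carryLoop d i).length = d.length := by
  intro i
  induction i with
  | zero => intro d; rfl
  | succ j ih => intro d; rw [carryLoop, ih, List.length_set, List.length_set]

theorem carryLoop_spec : ∀ (m : Nat) (d : List Nat), m < d.length →
    (∀ i, m < i → i < d.length → d.getD i 0 < 10) →
    msv (carryLoop d m) = msv d ∧
      ∀ i, 1 ≤ i → i < d.length → (carryLoop d m).getD i 0 < 10 := by
  intro m
  induction m with
  | zero =>
    intro d _ hlt
    exact ⟨rfl, fun i h1 h2 => hlt i (by omega) h2⟩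
  | succ j ih =>
    intro d hm hlt
    rw [carryLoop]
    set d1 := d.set j (d.getD j 0 + d.getD (j + 1) 0 / 10) with hd1
    have hd1len : d1.length = d.length := by rw [hd1, List.length_set]
    have hd1j1 : d1.getD (j+1) 0 = d.getD (j+1) 0 := getD_set_ne d j (j+1) _ (by omega)
    set d2 := d1.set (j + 1) (d1.getD (j + 1) 0 % 10) with hd2
    have hd2len : d2.length = d.length := by rw [hd2, List.length_set, hd1len]
    have e1 := msv_set d j (d.getD j 0 + d.getD (j + 1) 0 / 10) (by omega)
    have e2 := msv_set d1 (j + 1) (d1.getD (j + 1) 0 % 10) (by omega)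
    rw [hd1len, hd1j1] at e2
    have hXY : (10:Nat) ^ (d.length - 1 - j) = 10 * 10 ^ (d.length - 1 - (j + 1)) := by
      rw [← pow_succ']
      congr 1
      omega
    rw [hXY] at e1
    have hdm := Nat.div_add_mod (d.getD (j + 1) 0) 10
    have hmsv2 : msv d2 = msv d := by
      set a := d.getD j 0 with ha
      set c := d.getD (j + 1) 0 with hc
      set q := c / 10 with hqq
      set r := c % 10 with hrr
      set Y := (10:Nat) ^ (d.length - 1 - (j + 1)) with hY
      have e1' : msv d1 = msv d + q * (10 * Y) := by
        rw [add_mul] at e1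
        linarith
      have hcY : c * Y = q * (10 * Y) + r * Y := by
        rw [← hdm]
        ring
      have e2' : msv d2 + c * Y = msv d1 + r * Y := by
        rw [hd2, hd1j1]
        exact e2
      linarith [e1', e2', hcY]
    have hb2 : ∀ i, j < i → i < d2.length → d2.getD i 0 < 10 := by
      intro i hji hiL
      rcases eq_or_ne i (j + 1) with rfl | hne
      · rw [hd2, getD_set_self d1 (j+1) _ (by omega)]
        exact Nat.mod_lt _ (by norm_num)
      · rw [hd2, getD_set_ne d1 (j+1) i _ (Ne.symm hne), hd1,
          getD_set_ne d j i _ (by omega)]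
        exact hlt i (by omega) (by omega)
    obtain ⟨ihm, ihb⟩ := ih d2 (by omega) hb2
    refine ⟨by rw [ihm, hmsv2], ?_⟩
    intro i h1 h2
    exact ihb i h1 (by omega)

theorem loopB_le2_aux : ∀ (μ P bound fact k term S : Nat) (hf : 1 ≤ fact) (hk : 1 ≤ k),
    (bound + 2 - fact) * 2 + (2 - k) ≤ μ → 2 ≤ k → term = P / fact →
    loopB P bound fact k term S hf hk ≤ S + 2 * (P / fact) := by
  intro μ
  induction μ with
  | zero =>
    intro P bound fact k term S hf hk hμ hk2 hterm
    rw [loopB, dif_neg (by omega)]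
    exact Nat.le_add_right S _
  | succ μ ih =>
    intro P bound fact k term S hf hk hμ hk2 hterm
    rw [loopB]
    by_cases hg : fact ≤ bound
    · rw [dif_pos hg]
      have hdec : (bound + 2 - fact * k) * 2 + (2 - (k + 1)) ≤ μ := by
        have h2 : fact * 2 ≤ fact * k := Nat.mul_le_mul_left fact (by omega)
        omega
      have htermk : term / k = P / (fact * k) := by
        rw [hterm, Nat.div_div_eq_div_mul]
      have hrec := ih P bound (fact * k) (k + 1) (term / k) (S + term / k)
        (Nat.mul_pos hf hk) (Nat.le_succ_of_le hk) hdec (by omega) htermk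
      refine le_trans hrec ?_
      have h1 : P / (fact * k) = P / fact / k := (Nat.div_div_eq_div_mul P fact k).symm
      have h2 : P / fact / k ≤ P / fact / 2 := Nat.div_le_div_left hk2 (by omega)
      omega
    · rw [dif_neg hg]
      exact Nat.le_add_right S _

theorem loopB_le2 : ∀ (P bound fact k term S : Nat) (hf : 1 ≤ fact) (hk : 1 ≤ k),
    2 ≤ k → term = P / fact →
    loopB P bound fact k term S hf hk ≤ S + 2 * (P / fact) := by
  intro P bound fact k term S hf hk hk2 hterm
  exact loopB_le2_aux ((bound + 2 - fact) * 2 + (2 - k)) P bound fact k term S hf hk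
    (Nat.le_refl _) hk2 hterm

-- the two while-loops agree: A's digit array recomposes to B's accumulator
theorem loop_eq (N : Nat) : ∀ (bound fact k : Nat) (digits tab : List Nat)
    (hf : 1 ≤ fact) (hk : 1 ≤ k),
    digits.length = N + 1 → tab.length = N + 1 →
    (k ≤ 2 → ∀ i, 2 ≤ i → i ≤ N → tab.getD i 0 = 0) →
    fact = (k - 1).factorial → ∀ term, term = 10 ^ N / fact →
    (loopA N bound fact k digits tab hf hk).length = N + 1 ∧
    msv (loopA N bound fact k digits tab hf hk) =
      loopB (10^N) bound fact k term (msv digits) hf hk := by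
  suffices h : ∀ (μ bound fact k : Nat) (digits tab : List Nat)
      (hf : 1 ≤ fact) (hk : 1 ≤ k),
      (bound + 2 - fact) * 2 + (2 - k) ≤ μ →
      digits.length = N + 1 → tab.length = N + 1 →
      (k ≤ 2 → ∀ i, 2 ≤ i → i ≤ N → tab.getD i 0 = 0) →
      fact = (k - 1).factorial → ∀ term, term = 10 ^ N / fact →
      (loopA N bound fact k digits tab hf hk).length = N + 1 ∧
      msv (loopA N bound fact k digits tab hf hk) =
        loopB (10^N) bound fact k term (msv digits) hf hk by
    intro bound fact k digits tab hf hk h1 h2 h3 h4 term h5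
    exact h ((bound + 2 - fact) * 2 + (2 - k)) bound fact k digits tab hf hk
      (Nat.le_refl _) h1 h2 h3 h4 term h5
  intro μ
  induction μ with
  | zero =>
    intro bound fact k digits tab hf hk hμ hd ht htz hfact term hterm
    rw [loopA, dif_neg (by omega), loopB, dif_neg (by omega)]
    exact ⟨hd, rfl⟩
  | succ μ ih =>
    intro bound fact k digits tab hf hk hμ hd ht htz hfact term hterm
    by_cases hg : fact ≤ bound
    · rw [loopA, dif_pos hg, loopB, dif_pos hg]
      have hbpos : 0 < fact * k := Nat.mul_pos hf hk
      have hfact' : fact * k = (k + 1 - 1).factorial := by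
        simp only [Nat.add_sub_cancel]
        obtain ⟨k', rfl⟩ : ∃ k', k = k' + 1 := ⟨k - 1, by omega⟩
        rw [hfact, Nat.mul_comm]
        simp [Nat.factorial_succ]
      have htab' : tabOK N (fact * k) (longDiv 1 (fact * k) tab) := by
        by_cases hk1 : k = 1
        · have hf1 : fact * k = 1 := by
            rw [hfact, hk1]
            simp [Nat.factorial]
          rw [hf1]
          exact longDiv_one N tab ht (htz (by omega))
        · by_cases hk2 : k = 2
          · have hf2 : fact * k = 2 := by
              rw [hfact, hk2]
              simp [Nat.factorial]
            rw [hf2]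
            exact longDiv_two N tab ht (htz (by omega))
          · have hk3 : 3 ≤ k := by omega
            have h3 : (3:Nat) ∣ fact * k := by
              rw [hfact']
              simp only [Nat.add_sub_cancel]
              exact Nat.dvd_factorial (by norm_num) hk3
            have hnd : ∀ m, 1 ≤ m → ¬ (fact * k) ∣ 10 ^ m := by
              intro m _ hdvd
              have h310 : (3:Nat) ∣ 10 ^ m := h3.trans hdvd
              have h0 : (10:Nat) ^ m % 3 = 0 := Nat.dvd_iff_mod_eq_zero.1 h310
              have h1 : (10:Nat) ^ m % 3 = 1 := by
                rw [Nat.pow_mod]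
                norm_num
              omega
            exact longDiv_spec3 N (fact * k) hbpos hnd tab ht
      have hmsvtab : msv (longDiv 1 (fact * k) tab) = 10 ^ N / (fact * k) :=
        msv_tabOK N (fact * k) _ hbpos htab'
      have hdig' : (addTab (longDiv 1 (fact * k) tab) (N + 1) digits).length = N + 1 := by
        rw [addTab_length, hd]
      have hmsv' : msv (addTab (longDiv 1 (fact * k) tab) (N + 1) digits) =
          msv digits + 10 ^ N / (fact * k) := by
        rw [addTab_msv N _ _ hd htab'.1, hmsvtab]
      have htz' : k + 1 ≤ 2 → ∀ i, 2 ≤ i → i ≤ N →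
          (longDiv 1 (fact * k) tab).getD i 0 = 0 := by
        intro hk12 i h2 hiN
        have hk1 : k = 1 := by omega
        have hf1 : fact * k = 1 := by
          rw [hfact, hk1]
          simp [Nat.factorial]
        rw [htab'.2 i hiN, hf1, digitAt_one, if_neg (by omega)]
      have hdec : (bound + 2 - fact * k) * 2 + (2 - (k + 1)) ≤ μ := by
        have h2 : fact * 2 ≤ fact * k ∨ k = 1 := by
          rcases eq_or_ne k 1 with rfl | hne
          · exact Or.inr rfl
          · exact Or.inl (Nat.mul_le_mul_left fact (by omega))
        rcases h2 with h2 | rfl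
        · omega
        · simp only [Nat.mul_one] at *
          omega
      have htermk : term / k = 10 ^ N / (fact * k) := by
        rw [hterm, Nat.div_div_eq_div_mul]
      obtain ⟨ihl, ihv⟩ := ih bound (fact * k) (k + 1) _ _
        (Nat.mul_pos hf hk) (Nat.le_succ_of_le hk) hdec hdig' htab'.1 htz' hfact'
        (term / k) htermk
      exact ⟨ihl, by rw [ihv, hmsv', htermk]⟩
    · rw [loopA, dif_neg hg, loopB, dif_neg hg]
      exact ⟨hd, rfl⟩

theorem loopB_le_start (P bound : Nat) :
    loopB P bound 1 1 P P (Nat.le_refl 1) (Nat.le_refl 1) ≤ 4 * P := by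
  rw [loopB]
  by_cases hg : 1 ≤ bound
  · rw [dif_pos hg]
    have hb := loopB_le2 P bound (1 * 1) (1 + 1) (P / 1) (P + P / 1)
      (Nat.mul_pos (Nat.le_refl 1) (Nat.le_refl 1)) (Nat.le_succ_of_le (Nat.le_refl 1))
      (by norm_num) (by norm_num)
    refine le_trans hb ?_
    simp only [Nat.mul_one, Nat.div_one]
    omega
  · rw [dif_neg hg]
    omega

theorem digLoop_length : ∀ (m S : Nat), (digLoop S m).length = m := by
  intro m
  induction m with
  | zero => intro S; rfl
  | succ m ih => intro S; simp [digLoop, ih]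

theorem digLoop_getElem : ∀ (m S j : Nat) (h : j < (digLoop S m).length),
    (digLoop S m)[j] = S / 10 ^ j % 10 := by
  intro m
  induction m with
  | zero => intro S j h; simp [digLoop] at h
  | succ m ih =>
    intro S j h
    match j with
    | 0 => simp [digLoop]
    | j + 1 =>
      simp only [digLoop, List.getElem_cons_succ]
      rw [ih (S / 10) j (by simpa [digLoop, digLoop_length] using h),
        Nat.div_div_eq_div_mul, ← pow_succ']

theorem zad4_eq_alt (n : Int) (_hn : 0 ≤ n) : zad4 n = zad4_alt n := by
  simp only [zad4, zad4_alt]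
  set N := n.toNat with hN
  have hd0len : (1 :: List.replicate N 0 : List Nat).length = N + 1 := by simp
  have hd0msv : msv (1 :: List.replicate N 0) = 10 ^ N := by
    simp [msv, msv_replicate_zero]
  have ht0len : (List.replicate (N + 1) (0:Nat)).length = N + 1 := by simp
  obtain ⟨hLlen, hLmsv⟩ := loop_eq N (10 ^ N + 1) 1 1 (1 :: List.replicate N 0)
    (List.replicate (N + 1) 0) (Nat.le_refl 1) (Nat.le_refl 1) hd0len ht0len
    (fun _ i _ _ => by simp) rfl (10 ^ N) (Nat.div_one _).symm
  set d := loopA N (10 ^ N + 1) 1 1 (1 :: List.replicate N 0) (List.replicate (N + 1) 0)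
    (Nat.le_refl 1) (Nat.le_refl 1) with hdd
  rw [hd0msv] at hLmsv
  set S := loopB (10 ^ N) (10 ^ N + 1) 1 1 (10 ^ N) (10 ^ N) (Nat.le_refl 1) (Nat.le_refl 1)
    with hS
  obtain ⟨hcm, hcb⟩ := carryLoop_spec (d.length - 1) d (by omega)
    (fun i h1 h2 => absurd h2 (by omega))
  set r := carryLoop d (d.length - 1) with hr
  have hrlen : r.length = N + 1 := by rw [hr, carryLoop_length, hLlen]
  have hrmsv : msv r = S := by rw [hr, hcm, hLmsv]
  have hrb : ∀ i, 1 ≤ i → i < N + 1 → r.getD i 0 < 10 := by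
    intro i h1 h2
    exact hcb i h1 (by omega)
  have hSle : S ≤ 4 * 10 ^ N := loopB_le_start (10 ^ N) (10 ^ N + 1)
  have hSlt : S < 10 ^ (N + 1) := by
    have hp : (0:Nat) < 10 ^ N := pow_pos (by norm_num) N
    have h4 : (4:Nat) * 10 ^ N < 10 ^ (N + 1) := by
      rw [pow_succ]
      nlinarith
    omega
  have htake : r.take (N + 1) = r := List.take_of_length_le (by omega)
  rw [htake]
  apply List.ext_getElem
  · simp [hrlen, digLoop_length]
  · intro i hi1 hi2
    simp only [List.getElem_map, List.getElem_reverse, digLoop_length, digLoop_getElem,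
      Nat.add_sub_cancel]
    have hiN : i < N + 1 := by simpa [hrlen] using hi1
    have hrep := msv_getD r (fun j hj1 hj2 => hrb j hj1 (by omega)) i (by omega)
    have hgd : r.getD i 0 = r[i] := by
      rw [List.getD_eq_getElem?_getD, List.getElem?_eq_getElem (by omega : i < r.length)]
      rfl
    rw [← hgd]
    rcases Nat.eq_zero_or_pos i with rfl | hi0
    · rw [hrep, if_pos rfl, hrmsv, hrlen]
      simp only [Nat.add_sub_cancel, Nat.sub_zero]
      have hdiv : S / 10 ^ N < 10 := by
        rw [Nat.div_lt_iff_lt_mul (pow_pos (by norm_num) N), Nat.mul_comm]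
        calc S < 10 ^ (N + 1) := hSlt
          _ = 10 ^ N * 10 := by ring
      rw [Nat.mod_eq_of_lt hdiv]
    · rw [hrep, if_neg (by omega), hrmsv, hrlen]
      have he : N + 1 - 1 - i = N - i := by omega
      rw [he]

-- ===== VERDICT (by name: the statement is the Claim_ definition above) =====
theorem zad4_spec : Claim_equal_zad4 := by
  intro n _ hpre
  unfold Spec_zad4
  exact zad4_eq_alt n hpre
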